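/- GENERATED by mk_final_copies.py from the proof of the farm's unit `stb_vorbis_get_frame_float.6` (farm:stb_vorbis_get_frame_float.6.1: Proof.lean) as the
   re-elaboration sweep compiled it — do not edit. -/
import Asan.CheckWalk
import Vorbis.Spec.Units.stb_vorbis_get_frame_float_6

/- SEGMENT 6 OF stb_vorbis_get_frame_float (the single epilogue 119769H … `ret`, 11 instructions), in the farm's format: THE EPILOGUE OF A
   PROTECTED FRAME. The recipe (farm/hints/protected_frame.md): the shadow index in r14 is named as a number `sb` WITH LINEAR BOUNDS before
   the walk, so that the walker reads the six pops and the return address THROUGH the two inline shadow stores; afterwards the two stores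
   are `storesMem … F.epilogue` (`gff_epilogue_inv`), the invariant goes back to the callers' frame list by `DecodeInv.carry`. -/
open X86 X86.User Asan Vorbis Vorbis.Spec

set_option maxRecDepth 4000
set_option maxHeartbeats 4000000

namespace Vorbis.Spec.stb_vorbis_get_frame_float_6

/-- The shadow index of the frame's base as a number: `(sp − 152) >> 3 = sb` when `8 · sb = sp − 152`. Stated apart: in a context
without disjunctions `u_omega` does the shift. -/
theorem seg6_granule (sp : Word) (sb : Nat) (hsb : 8 * sb = sp.toNat - 152) (hlo : 0x700000 + 4240 ≤ sp.toNat)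
    (hhi : sp.toNat + 8 ≤ 0x800000) : (sp - 152) >>> 3 = UInt64.ofNat sb := by
  apply UInt64.toNat_inj.mp
  u_omega

/-- The low half of a small number, as the walker writes it. -/
theorem seg6_part32 (r : Nat) (h : r < 2 ^ 31) : Word.part .w32 (UInt64.ofNat r) = BitVec.ofNat 32 r := by
  apply BitVec.eq_of_toNat_eq
  show (BitVec.setWidth 32 (UInt64.ofNat r).toBitVec).toNat = _
  rw [BitVec.toNat_setWidth, BitVec.toNat_ofNat]
  have : (UInt64.ofNat r).toBitVec.toNat = r := by
    show (UInt64.ofNat r).toNat = r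
    rw [UInt64.toNat_ofNat']
    omega
  rw [this]

/-- **The result register**: `mov eax, ebp` with `ebp = r`, a non-negative `int`: `s32 rax = r`, and rax is zero-extended. -/
theorem seg6_result (r : Nat) (h : r < 2 ^ 31) :
    s32 (Word.ofBV (Word.part .w32 (UInt64.ofNat r))) = (r : Int) ∧
    (Word.ofBV (Word.part .w32 (UInt64.ofNat r))).toNat < 2 ^ 32 := by
  constructor
  · show (Word.part .w32 (Word.ofBV (Word.part .w32 (UInt64.ofNat r)))).toInt = _
    rw [X86.Word.part_w32_ofBV32, seg6_part32 r h]
    show (BitVec.ofNat 32 r).toInt = (r : Int)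
    rw [BitVec.toInt_eq_toNat_cond, BitVec.toNat_ofNat]
    split <;> omega
  · have e : (Word.ofBV (Word.part .w32 (UInt64.ofNat r))).toNat = ((Word.part .w32 (UInt64.ofNat r)).setWidth 64).toNat :=
      id rfl
    rw [e, BitVec.toNat_setWidth]
    have hlt : (Word.part .w32 (UInt64.ofNat r)).toNat < 2 ^ 32 := (Word.part .w32 (UInt64.ofNat r)).isLt
    omega

/-- **A read below the shadow region goes through the epilogue's two shadow stores** (`Mem.readLE_writeLE_disjoint_noWrap` twice; the
walker's own load resolution and `u_read` do not do it). -/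
theorem seg6_read_through (m : Mem) (sb : Nat) (b : Word) (k : Nat) (hsb1 : 0xE0000 + 511 ≤ sb) (hsb2 : sb + 20 ≤ 0x100000)
    (hb : b.toNat + k ≤ 0xC00000) :
    ((m.writeLE (UInt64.ofNat sb + 12582912) 8 0).writeLE (UInt64.ofNat sb + 12582920) 4 0).readLE b k = m.readLE b k := by
  have e0 : (UInt64.ofNat sb + 12582912).toNat = sb + 12582912 := by u_omega
  have e8 : (UInt64.ofNat sb + 12582920).toNat = sb + 12582920 := by u_omega
  rw [Mem.readLE_writeLE_disjoint_noWrap _ _ _ _ _ _ (by unfold Mem.NoWrap; omega) (by unfold Mem.NoWrap; omega) (by omega),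
    Mem.readLE_writeLE_disjoint_noWrap _ _ _ _ _ _ (by unfold Mem.NoWrap; omega) (by unfold Mem.NoWrap; omega) (by omega)]

/-- **`Top.FrameOut` over stores into the shadow region only**: it reads `*f` (`channels`, `blocksize_1`, the two pointer arrays:
`c < channels ≤ 16`) and the two out-objects, all below C00000H. -/
theorem seg6_frameOut {m m' : Mem} {f pc po : Nat} {r : Int}
    (hs : Mem.SameExcept [⟨0xC00000, 0xE00000⟩] m m') (hf : f + 1808 ≤ 0xC00000) (hpc : pc + 4 ≤ 0xC00000)
    (hpo : po + 8 ≤ 0xC00000) (h16 : stb_vorbis.channels m f ≤ 16) (h : Top.FrameOut m f pc po r) :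
    Top.FrameOut m' f pc po r := by
  have rd : ∀ a k : Nat, a + k ≤ 0xC00000 → m'.readLE (addr a) k = m.readLE (addr a) k := by
    intro a k hak
    apply readLE_addr_congr
    intro i hi
    apply hs
    intro w hw
    simp only [List.mem_cons, List.not_mem_nil, or_false] at hw
    subst hw
    left
    rw [toNat_addr _ (by omega)]
    show a + i < 0xC00000
    omega
  have e32 : ∀ a : Nat, a + 4 ≤ 0xC00000 → m'.i32 a = m.i32 a := by
    intro a ha
    unfold Mem.i32 Mem.u32
    rw [rd a 4 ha]
  have eu64 : ∀ a : Nat, a + 8 ≤ 0xC00000 → m'.u64 a = m.u64 a := by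
    intro a ha
    unfold Mem.u64
    rw [rd a 8 ha]
  have eptr : ∀ a : Nat, a + 8 ≤ 0xC00000 → m'.ptr a = m.ptr a := by
    intro a ha
    unfold Mem.ptr
    exact eu64 a ha
  have ech : stb_vorbis.channels m' f = stb_vorbis.channels m f := by
    simp only [vacc, voff]
    exact e32 _ (by omega)
  have eb1 : stb_vorbis.blocksize_1 m' f = stb_vorbis.blocksize_1 m f := by
    simp only [vacc, voff]
    exact e32 _ (by omega)
  obtain ⟨h1, h2, left, h3, h4⟩ := h
  refine ⟨?_, ?_, left, ?_, ?_⟩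
  · intro hne
    rw [e32 pc hpc, ech]
    exact h1 hne
  · intro hne
    rw [eptr po hpo]
    exact h2 hne
  · rw [eb1]
    exact h3
  · intro c hc
    rw [ech] at hc
    have hc16 : c < 16 := by omega
    have := h4 c hc
    simp only [vacc, voff] at this ⊢
    rw [eu64 _ (by omega), eu64 _ (by omega)]
    exact this

end Vorbis.Spec.stb_vorbis_get_frame_float_6

open Vorbis.Spec.stb_vorbis_get_frame_float_6

/-- **Segment 6**: from the epilogue's head (`AtEpi`) to the contract's `Returned`. -/
theorem Vorbis.Spec.Worked.stb_vorbis_get_frame_float_6_ok : Vorbis.Spec.stb_vorbis_get_frame_float_6.Statement := by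
  intro Lay hLay μ hμ u₀ hcode others frames len A stored room ysz u ret f r v hat
  -- the entry state's facts, from the assertion
  have he := hat.frame.entry
  have hpre := hat.frame.pre
  have hf := hat.frame.rdi
  v_entry he
  obtain ⟨hsh, hdi0, hpc, hpo, hapart⟩ := hpre
  rw [hf] at hdi0
  have hwf := stb_vorbis_get_frame_float.gff_obj_where hdi0
  have hfr := stb_vorbis_get_frame_float.gff_frames_above hsh.inv
  obtain ⟨j_rip, hfrm, j_rbp, hr31, hout⟩ := hat
  obtain ⟨_, _, _, j_rsp, j_r14, hs15, hs14, hs13, hs12, hsbp, hsbx, hs0, hsame, j_code, j_inv, hinv, hdi⟩ := hfrm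
  -- THE GRANULE AS A NUMBER WITH LINEAR BOUNDS (no `>>> 3`, no `/ 8` in the walk's context)
  obtain ⟨sb, hsb⟩ : ∃ sb : Nat, 8 * sb = (u.reg .rsp).toNat - 152 := ⟨((u.reg .rsp).toNat - 152) / 8, by omega⟩
  have hgr := seg6_granule (u.reg .rsp) sb hsb he_room he_top
  rw [hgr] at j_r14
  have hsb1 : 0xE0000 + 511 ≤ sb := by omega
  have hsb2 : sb + 20 ≤ 0x100000 := by omega
  have w_rip := j_rip
  have w_eq := Vorbis.conv_code_eqOn j_code
  have hdf : v.flags .df = false := (show X86.User.abiInv _ from j_inv).1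
  have hmx : v.mxcsr &&& 0x1F80 = 0x1F80 := (show X86.User.abiInv _ from j_inv).2
  u_walk hcode [hμ.vendor] span [Vorbis.L.textLo, Vorbis.L.textHi] side (v_side)
  · -- the `ret`: the return address, read through the two shadow stores, is canonical
    rw [seg6_read_through v.mem sb (u.reg .rsp) 8 hsb1 hsb2 (by omega), hs0]
    exact he_ret_lt
  · refine ReachVia.done ?_
    -- the six pops and the return address, read through the two shadow stores
    rw [seg6_read_through v.mem sb (u.reg .rsp) 8 hsb1 hsb2 (by omega), hs0] at w_rip
    rw [seg6_read_through v.mem sb (u.reg .rsp - 8) 8 hsb1 hsb2 (by u_omega), hs15] at w_r15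
    rw [seg6_read_through v.mem sb (u.reg .rsp - 16) 8 hsb1 hsb2 (by u_omega), hs14] at w_r14
    rw [seg6_read_through v.mem sb (u.reg .rsp - 24) 8 hsb1 hsb2 (by u_omega), hs13] at w_r13
    rw [seg6_read_through v.mem sb (u.reg .rsp - 32) 8 hsb1 hsb2 (by u_omega), hs12] at w_r12
    rw [seg6_read_through v.mem sb (u.reg .rsp - 40) 8 hsb1 hsb2 (by u_omega), hsbp] at w_rbp
    rw [seg6_read_through v.mem sb (u.reg .rsp - 48) 8 hsb1 hsb2 (by u_omega), hsbx] at w_rbx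
    -- the shadow layer of the callers' list again: the two stores are the frame's epilogue
    have hinvR : ShadowInv others frames ((u.reg .rsp).toNat + 8) s_119792.mem := by
      rw [w_mem, ← hgr]
      exact stb_vorbis_get_frame_float.gff_epilogue_inv hinv he_align he_room he_top hfr
    -- no block of the decode-time predicate was touched: the invariant for the callers' list
    have hsS : Mem.SameExcept [⟨0x700000, 0x800000⟩, ⟨0xC00000, 0xE00000⟩] v.mem s_119792.mem := by
      rw [w_mem]
      u_same
    have hk : AllKept (RunBlk A len) v.mem s_119792.mem :=
      stb_vorbis_get_frame_float.gff_allKept_stack_shadow hdi hsS (by omega) (by omega)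
    have hdiR : DecodeInv others frames len A stored room ysz s_119792.mem f := hdi.carry hinv hk hinvR
    have hres := seg6_result r hr31
    have e_rsp : (s_119792.reg .rsp).toNat = (u.reg .rsp).toNat + 8 := by
      rw [w_rsp]
      u_omega
    v_returned
    · show _ ∧ _ ∧ _ ∧ _ ∧ _
      rw [hf, e_rsp, w_rax]
      refine ⟨hinvR, hdiR, ?_, hres.2, ?_⟩
      · rw [hres.1]
        omega
      · intro hne
        rw [hres.1] at hne ⊢
        have hr0 : r ≠ 0 := by omega
        have hsO : Mem.SameExcept [⟨0xC00000, 0xE00000⟩] v.mem s_119792.mem := by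
          rw [w_mem]
          u_same
        have h16 := hdi.config.header.HD1.2
        refine seg6_frameOut hsO (by omega) ?_ ?_ h16 (hout hr0)
        · rcases hpc with h0 | hobj
          · omega
          · have := hobj.2.2
            omega
        · rcases hpo with h0 | hobj
          · omega
          · have := hobj.2.2
            omega
    · intro q hq
      cases q <;> first
        | (exact absurd hq (by decide))
        | (with_reducible assumption)
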